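-- pv_equiv track=rewrite | github.com/eellookkaa/mddm | IFP.py | find_reference_point
-- ===== SOURCE A (Python) =====
-- def find_reference_point(vertices):
--     if not vertices:
--         return None, None  # No vertices provided
--
--     reference_point = vertices[0]  # Initialize with the first vertex
--     reference_point_index = 0
--
--
--     for index, vertex in enumerate(vertices):
--         if vertex[1] > reference_point[1] or (vertex[1] == reference_point[1] and vertex[0] < reference_point[0]):
--             reference_point = vertex
--             reference_point_index = index
--
--     return reference_point, reference_point_index
-- ===== SOURCE B (Python) =====
-- def find_reference_point(vertices):
--     if not vertices:
--         return None, None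
--     max_y = max(v[1] for v in vertices)
--     best = None
--     best_index = None
--     for index, vertex in enumerate(vertices):
--         if vertex[1] == max_y and (best is None or vertex[0] < best[0]):
--             best = vertex
--             best_index = index
--     return best, best_index
-- ===== Notes on version B (the rewrite author's own statement) =====
-- stated objective: alternative
-- what changed: Replaces A's single fused comparison-chain fold with a two-pass decomposition: first compute max_y with max(), then select among the vertices at that height the first one with smallest x.
import Mathlib
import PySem

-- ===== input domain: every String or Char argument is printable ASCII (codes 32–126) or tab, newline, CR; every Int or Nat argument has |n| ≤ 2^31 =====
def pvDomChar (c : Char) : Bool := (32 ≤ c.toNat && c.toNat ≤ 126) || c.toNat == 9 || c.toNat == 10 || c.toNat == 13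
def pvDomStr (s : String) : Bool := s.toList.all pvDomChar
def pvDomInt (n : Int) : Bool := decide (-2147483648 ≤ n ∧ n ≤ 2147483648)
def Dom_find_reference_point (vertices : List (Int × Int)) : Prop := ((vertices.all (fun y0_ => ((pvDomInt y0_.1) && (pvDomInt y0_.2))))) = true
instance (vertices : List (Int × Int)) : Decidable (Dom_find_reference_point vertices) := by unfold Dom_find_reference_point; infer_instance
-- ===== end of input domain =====

-- B replaces A's fused comparison-chain fold by a two-pass decomposition (max_y first,
-- then first minimal-x vertex at that height); alternative structure, same return value.

-- ===== PORT A =====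
-- the loop body of A: update (reference_point, reference_point_index)
def frpStep (s : (Int × Int) × Int) (p : Int × (Int × Int)) : (Int × Int) × Int :=
  if p.2.2 > s.1.2 ∨ (p.2.2 = s.1.2 ∧ p.2.1 < s.1.1) then (p.2, p.1) else s

def find_reference_point (vertices : List (Int × Int)) : (Option (Int × Int)) × Option Int :=
  match vertices with
  | [] => (none, none)
  | v0 :: _ =>
    let r := (PySem.List.enumerate vertices 0).foldl frpStep (v0, 0)
    (some r.1, some r.2)

-- ===== PORT B =====
-- the loop body of B: keep the first vertex with y = M and minimal x
def frpPick (M : Int) (b : Option ((Int × Int) × Int)) (p : Int × (Int × Int)) :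
    Option ((Int × Int) × Int) :=
  if p.2.2 = M ∧ (∀ bv ∈ b, p.2.1 < bv.1.1) then some (p.2, p.1) else b

def find_reference_point_alt (vertices : List (Int × Int)) : (Option (Int × Int)) × Option Int :=
  match vertices with
  | [] => (none, none)
  | _ :: _ =>
    match PySem.List.max? (vertices.map (·.2)) (fun y => y) with
    | none => (none, none)   -- unreachable: vertices ≠ []
    | some M =>
      match (PySem.List.enumerate vertices 0).foldl (frpPick M) none with
      | some (v, i) => (some v, some i)
      | none => (none, none) -- unreachable: the maximum is attained

-- ===== PRECONDITION & SPEC =====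
def Spec_find_reference_point (vertices : List (Int × Int)) (out : (Option (Int × Int)) × Option Int) : Prop := out = find_reference_point_alt vertices
instance (vertices : List (Int × Int)) (out : (Option (Int × Int)) × Option Int) : Decidable (Spec_find_reference_point vertices out) := by unfold Spec_find_reference_point; infer_instance

-- ===== CLAIM (what is proved, stated in full; the proofs are below) =====
def Claim_equal_find_reference_point : Prop := ∀ (vertices : List (Int × Int)), Dom_find_reference_point vertices → Spec_find_reference_point vertices (find_reference_point vertices)

-- ===== LEMMAS AND PROOFS =====
-- the running maximum of the y-coordinates of a nonempty list v0 :: t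
def frpMaxY (v0 : Int × Int) (t : List (Int × Int)) : Int :=
  (t.map (·.2)).foldl max v0.2

theorem frpMaxY_append (v0 a : Int × Int) (t : List (Int × Int)) :
    frpMaxY v0 (t ++ [a]) = max (frpMaxY v0 t) a.2 := by
  simp [frpMaxY]

theorem frpMaxY_le (v0 : Int × Int) (t : List (Int × Int)) :
    v0.2 ≤ frpMaxY v0 t ∧ ∀ p ∈ t, p.2 ≤ frpMaxY v0 t := by
  have h := PySem.List.le_foldl_max (t.map (·.2)) v0.2
  refine ⟨h.1, fun p hp => h.2 _ (List.mem_map_of_mem hp)⟩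

theorem frpEnumerate_singleton (a : Int × Int) (s : Int) :
    PySem.List.enumerate [a] s = [(s, a)] := by
  simp [PySem.List.enumerate_cons, PySem.List.enumerate_nil]

theorem frpPick_skip (M : Int) (l : List (Int × (Int × Int)))
    (b : Option ((Int × Int) × Int)) (h : ∀ p ∈ l, p.2.2 ≠ M) :
    l.foldl (frpPick M) b = b := by
  induction l generalizing b with
  | nil => rfl
  | cons x xs ih =>
    have hx : x.2.2 ≠ M := h x (List.mem_cons_self)
    have hstep : frpPick M b x = b := by simp [frpPick, hx]
    rw [List.foldl_cons, hstep]
    exact ih b (fun p hp => h p (List.mem_cons_of_mem _ hp))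

-- main invariant: A's fold state has y = frpMaxY, and B's fold returns exactly A's state
theorem frp_main (v0 : Int × Int) (t : List (Int × Int)) :
    ((PySem.List.enumerate (v0 :: t) 0).foldl frpStep (v0, 0)).1.2 = frpMaxY v0 t ∧
    (PySem.List.enumerate (v0 :: t) 0).foldl (frpPick (frpMaxY v0 t)) none =
      some ((PySem.List.enumerate (v0 :: t) 0).foldl frpStep (v0, 0)) := by
  induction t using List.reverseRecOn with
  | nil =>
    constructor
    · simp [PySem.List.enumerate, frpStep, frpMaxY]
    · simp [PySem.List.enumerate, frpStep, frpPick, frpMaxY]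
  | append_singleton t a ih =>
    have hcons : (v0 :: (t ++ [a])) = (v0 :: t) ++ [a] := by simp
    rw [hcons, PySem.List.enumerate_append, List.foldl_append, List.foldl_append]
    set r := (PySem.List.enumerate (v0 :: t) 0).foldl frpStep (v0, 0) with hr
    have hle := frpMaxY_le v0 t
    have h1 : r.1.2 = frpMaxY v0 t := ih.1
    rw [frpMaxY_append, frpEnumerate_singleton]
    simp only [List.foldl_cons, List.foldl_nil]
    rcases lt_trichotomy (frpMaxY v0 t) a.2 with hgt | heq | hlt
    · -- a.2 is a new strict maximum
      have hmax : max (frpMaxY v0 t) a.2 = a.2 := max_eq_right hgt.le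
      rw [hmax]
      have hskip : (PySem.List.enumerate (v0 :: t) 0).foldl (frpPick a.2) none = none := by
        apply frpPick_skip
        intro p hp
        have hp2 : p.2 ∈ (v0 :: t) := by
          rw [← PySem.List.map_snd_enumerate (v0 :: t) 0]
          exact List.mem_map_of_mem hp
        have : p.2.2 ≤ frpMaxY v0 t := by
          rcases List.mem_cons.mp hp2 with h' | h'
          · rw [h']; exact hle.1
          · exact hle.2 _ h'
        omega
      rw [hskip]
      simp only [frpStep, frpPick]
      rw [if_pos (show a.2 > r.1.2 ∨ a.2 = r.1.2 ∧ a.1 < r.1.1 from Or.inl (by omega))]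
      rw [if_pos (show True ∧ ∀ bv ∈ (none : Option ((Int × Int) × Int)), a.1 < bv.1.1 from
        ⟨trivial, fun bv hbv => by simp at hbv⟩)]
      exact ⟨rfl, rfl⟩
    · -- a.2 equals the old maximum: both update iff a.1 < r.1.1
      have hmax : max (frpMaxY v0 t) a.2 = frpMaxY v0 t := by omega
      rw [hmax, ih.2]
      simp only [frpStep, frpPick]
      by_cases hx : a.1 < r.1.1
      · rw [if_pos (show a.2 > r.1.2 ∨ a.2 = r.1.2 ∧ a.1 < r.1.1 from Or.inr ⟨by omega, hx⟩)]
        rw [if_pos (show a.2 = frpMaxY v0 t ∧ ∀ bv ∈ some r, a.1 < bv.1.1 from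
          ⟨by omega, fun bv hbv => by
            rw [Option.mem_def, Option.some.injEq] at hbv; rw [← hbv]; exact hx⟩)]
        exact ⟨show a.2 = frpMaxY v0 t by omega, rfl⟩
      · rw [if_neg (show ¬(a.2 > r.1.2 ∨ a.2 = r.1.2 ∧ a.1 < r.1.1) by
              push Not; exact ⟨by omega, fun _ => le_of_not_gt hx⟩)]
        rw [if_neg (show ¬(a.2 = frpMaxY v0 t ∧ ∀ bv ∈ some r, a.1 < bv.1.1) from
              fun hc => hx (hc.2 r rfl))]
        exact ⟨h1, rfl⟩
    · -- a.2 below the maximum: neither updates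
      have hmax : max (frpMaxY v0 t) a.2 = frpMaxY v0 t := by omega
      rw [hmax, ih.2]
      simp only [frpStep, frpPick]
      rw [if_neg (show ¬(a.2 > r.1.2 ∨ a.2 = r.1.2 ∧ a.1 < r.1.1) by
            push Not; exact ⟨by omega, fun h => absurd h (by omega)⟩)]
      rw [if_neg (show ¬(a.2 = frpMaxY v0 t ∧ ∀ bv ∈ some r, a.1 < bv.1.1) from
            fun hc => absurd hc.1 (by omega))]
      exact ⟨h1, rfl⟩

-- ===== VERDICT (by name: the statement is the Claim_ definition above) =====
theorem find_reference_point_spec : Claim_equal_find_reference_point := by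
  intro vertices _
  unfold Spec_find_reference_point
  match vertices with
  | [] => rfl
  | v0 :: t =>
    have hmax : PySem.List.max? ((v0 :: t).map (·.2)) (fun y => y) = some (frpMaxY v0 t) := by
      rw [List.map_cons, PySem.List.max?_id_cons]; rfl
    have h := frp_main v0 t
    simp only [find_reference_point, find_reference_point_alt, hmax, h.2]
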